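-- pv_equiv track=rewrite | github.com/hijongyoon/Coding-Practice | brute force/blackjack.py | check
-- ===== SOURCE A (Python) =====
-- def check(li,num):
--     max=0
--     for i in range(len(li)-2):
--         for j in range(i+1,len(li)-1):
--             for k in range(j+1,len(li)):
--                 if li[i]+li[j]+li[k]==num: return num
--                 elif max<li[i]+li[j]+li[k] <num: max=li[i]+li[j]+li[k]
--     return max
-- ===== SOURCE B (Python) =====
-- def check(li, num):
--     s = sorted(li)
--     n = len(s)
--     best = 0
--     for i in range(n - 2):
--         lo, hi = i + 1, n - 1
--         while lo < hi:
--             t = s[i] + s[lo] + s[hi]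
--             if t == num:
--                 return num
--             if t < num:
--                 if t > best:
--                     best = t
--                 lo += 1
--             else:
--                 hi -= 1
--     return best
-- ===== Notes on version B (the rewrite author's own statement) =====
-- stated objective: faster
-- what changed: Replaced the brute-force triple loop over all index triples by sort + fix-one-element + two-pointer scan for the best pair sum, with the same early return on an exact hit.
import Mathlib
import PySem

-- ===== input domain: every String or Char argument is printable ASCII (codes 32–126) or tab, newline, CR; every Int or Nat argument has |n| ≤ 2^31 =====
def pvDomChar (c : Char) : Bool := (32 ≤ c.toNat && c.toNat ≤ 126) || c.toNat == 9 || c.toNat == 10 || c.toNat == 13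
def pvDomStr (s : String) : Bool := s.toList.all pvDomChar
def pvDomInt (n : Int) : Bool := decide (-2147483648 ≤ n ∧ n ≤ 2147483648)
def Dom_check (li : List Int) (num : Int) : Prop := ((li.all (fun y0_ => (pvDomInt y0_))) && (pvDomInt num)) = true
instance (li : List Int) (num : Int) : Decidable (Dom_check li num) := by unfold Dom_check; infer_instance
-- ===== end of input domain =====

-- B replaces A's brute-force triple loop by sort + two-pointer scan: asymptotically faster (O(n^2) vs O(n^3)).

-- ===== PORT A =====
-- A: triple nested loop over index triples i<j<k; early `return num` encoded as Sum.inl.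
def check (li : List Int) (num : Int) : Int :=
  let r : Sum Int Int :=
    (PySem.List.pyRange 0 ((li.length : Int) - 2) 1).foldl (fun st i =>
      match st with
      | .inl r => .inl r
      | .inr mx =>
        (PySem.List.pyRange (i + 1) ((li.length : Int) - 1) 1).foldl (fun st j =>
          match st with
          | .inl r => .inl r
          | .inr mx =>
            (PySem.List.pyRange (j + 1) (li.length : Int) 1).foldl (fun st k =>
              match st with
              | .inl r => .inl r
              | .inr mx =>
                let t := PySem.List.pyGetD li i 0 + PySem.List.pyGetD li j 0 + PySem.List.pyGetD li k 0
                if t = num then .inl num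
                else if mx < t ∧ t < num then .inr t else .inr mx) (Sum.inr mx)) (Sum.inr mx))
      (Sum.inr 0)
  match r with
  | .inl r => r
  | .inr mx => mx

-- ===== PORT B =====
-- B's inner `while lo < hi` loop (two-pointer scan for the pair completing s[i]).
def tpLoop (s : List Int) (num i : Int) (lo hi best : Int) : Sum Int Int :=
  if h : lo < hi then
    let t := PySem.List.pyGetD s i 0 + PySem.List.pyGetD s lo 0 + PySem.List.pyGetD s hi 0
    if t = num then .inl num
    else if t < num then tpLoop s num i (lo + 1) hi (if t > best then t else best)
    else tpLoop s num i lo (hi - 1) best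
  else .inr best
termination_by (hi - lo).toNat
decreasing_by all_goals omega

def check_alt (li : List Int) (num : Int) : Int :=
  let s := PySem.List.sorted li (fun x => x) false
  let n : Int := s.length
  let r : Sum Int Int :=
    (PySem.List.pyRange 0 (n - 2) 1).foldl (fun st i =>
      match st with
      | .inl r => .inl r
      | .inr best => tpLoop s num i (i + 1) (n - 1) best) (Sum.inr 0)
  match r with
  | .inl r => r
  | .inr best => best

-- ===== PRECONDITION & SPEC =====
def Spec_check (li : List Int) (num : Int) (out : Int) : Prop := out = check_alt li num
instance (li : List Int) (num : Int) (out : Int) : Decidable (Spec_check li num out) := by unfold Spec_check; infer_instance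

-- ===== CLAIM (what is proved, stated in full; the proofs are below) =====
def Claim_equal_check : Prop := ∀ (li : List Int) (num : Int), Dom_check li num → Spec_check li num (check li num)

-- ===== LEMMAS AND PROOFS =====

-- index access shorthand used by the proofs
def G (l : List Int) (i : Int) : Int := PySem.List.pyGetD l i 0

-- `t` is a triple sum of `l` (three elements at strictly increasing positions)
def TS (l : List Int) (t : Int) : Prop :=
  ∃ i j k : Int, 0 ≤ i ∧ i < j ∧ j < k ∧ k < l.length ∧ G l i + G l j + G l k = t

-- `v` is what A's running max computes when no triple sums to num
def IsBest (l : List Int) (num v : Int) : Prop :=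
  0 ≤ v ∧ (∀ t, TS l t → t < num → t ≤ v) ∧ (v = 0 ∨ (v < num ∧ TS l v))

-- the early-exit scan both ports reduce to
def eScan (num : Int) (st : Sum Int Int) (ts : List Int) : Sum Int Int :=
  ts.foldl (fun st t =>
    match st with
    | .inl r => .inl r
    | .inr m => if t = num then .inl num else if m < t ∧ t < num then .inr t else .inr m) st

lemma eScan_inl (num r : Int) (ts : List Int) : eScan num (.inl r) ts = .inl r := by
  induction ts with
  | nil => rfl
  | cons t ts ih => simpa [eScan] using ih

def maxf (num : Int) (m : Int) (ts : List Int) : Int :=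
  ts.foldl (fun m t => if m < t ∧ t < num then t else m) m

lemma eScan_char (num m : Int) (ts : List Int) :
    eScan num (.inr m) ts = if num ∈ ts then .inl num else .inr (maxf num m ts) := by
  induction ts generalizing m with
  | nil => simp [eScan, maxf]
  | cons t ts ih =>
    by_cases ht : t = num
    · subst ht
      have h1 : eScan t (.inr m) (t :: ts) = eScan t (.inl t) ts := by simp [eScan]
      rw [h1, eScan_inl]
      simp
    · have h1 : eScan num (.inr m) (t :: ts)
          = eScan num (.inr (if m < t ∧ t < num then t else m)) ts := by
        simp only [eScan, List.foldl_cons]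
        split_ifs <;> simp_all
      rw [h1, ih]
      have hmem : (num ∈ t :: ts) ↔ (num ∈ ts) := by
        simp [List.mem_cons]; intro h; exact absurd h.symm ht
      by_cases hm : num ∈ ts
      · simp [hm, hmem.mpr hm]
      · have : ¬ num ∈ t :: ts := fun h => by
          rcases List.mem_cons.mp h with h | h
          · exact ht h.symm
          · exact hm h
        simp [hm, this, maxf]

lemma maxf_props (num m : Int) (ts : List Int) :
    m ≤ maxf num m ts ∧ (∀ t ∈ ts, t < num → t ≤ maxf num m ts) ∧
      (maxf num m ts = m ∨ (maxf num m ts < num ∧ maxf num m ts ∈ ts)) := by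
  induction ts generalizing m with
  | nil => simp [maxf]
  | cons t ts ih =>
    have step : maxf num m (t :: ts) = maxf num (if m < t ∧ t < num then t else m) ts := rfl
    rcases ih (m := if m < t ∧ t < num then t else m) with ⟨h1, h2, h3⟩
    rw [step]
    split_ifs at h1 h2 h3 ⊢ with h
    · exact ⟨by omega, fun u hu hun => by
        rcases List.mem_cons.mp hu with rfl | hu
        · exact h1
        · exact h2 u hu hun, by
        rcases h3 with h3 | ⟨h3a, h3b⟩
        · right; rw [h3]; exact ⟨h.2, List.mem_cons_self ..⟩
        · right; exact ⟨h3a, List.mem_cons_of_mem _ h3b⟩⟩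
    · exact ⟨h1, fun u hu hun => by
        rcases List.mem_cons.mp hu with rfl | hu
        · omega
        · exact h2 u hu hun, by
        rcases h3 with h3 | ⟨h3a, h3b⟩
        · left; exact h3
        · right; exact ⟨h3a, List.mem_cons_of_mem _ h3b⟩⟩

-- fold with early-exit state: once .inl, stays .inl
lemma foldl_step_inl {α : Type} (f : Int → α → Sum Int Int) (r : Int) (xs : List α) :
    xs.foldl (fun st x => match st with | .inl r => .inl r | .inr m => f m x) (Sum.inl r : Sum Int Int) = .inl r := by
  induction xs with
  | nil => rfl
  | cons x xs ih => simpa using ih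

-- eScan over chunks = eScan over the concatenation
lemma foldl_eScan_flatMap {α : Type} (num : Int) (g : α → List Int) (xs : List α) (st : Sum Int Int) :
    xs.foldl (fun st x =>
      match st with
      | .inl r => (Sum.inl r : Sum Int Int)
      | .inr m => eScan num (.inr m) (g x)) st
    = eScan num st (xs.flatMap g) := by
  have eScan_append : ∀ (a b : List Int) (st : Sum Int Int),
      eScan num st (a ++ b) = eScan num (eScan num st a) b := by
    intro a b st; simp [eScan, List.foldl_append]
  induction xs generalizing st with
  | nil => cases st <;> rfl
  | cons x xs ih =>
    cases st with
    | inl r =>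
      rw [foldl_step_inl (fun m x => eScan num (.inr m) (g x)), eScan_inl]
    | inr m =>
      simp only [List.foldl_cons, List.flatMap_cons]
      rw [ih, eScan_append]

-- ===== A-side characterisation =====

def sumsA (li : List Int) : List Int :=
  (PySem.List.pyRange 0 ((li.length : Int) - 2) 1).flatMap (fun i =>
    (PySem.List.pyRange (i + 1) ((li.length : Int) - 1) 1).flatMap (fun j =>
      (PySem.List.pyRange (j + 1) (li.length : Int) 1).map (fun k => G li i + G li j + G li k)))

lemma check_eq_eScan (li : List Int) (num : Int) :
    check li num = match eScan num (.inr 0) (sumsA li) with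
      | .inl r => r | .inr m => m := by
  have hinner : ∀ (mx i j : Int),
      (PySem.List.pyRange (j + 1) (li.length : Int) 1).foldl (fun st k =>
        match st with
        | .inl r => .inl r
        | .inr mx =>
          let t := PySem.List.pyGetD li i 0 + PySem.List.pyGetD li j 0 + PySem.List.pyGetD li k 0
          if t = num then .inl num
          else if mx < t ∧ t < num then .inr t else .inr mx) (Sum.inr mx)
      = eScan num (.inr mx) ((PySem.List.pyRange (j + 1) (li.length : Int) 1).map
          (fun k => G li i + G li j + G li k)) := by
    intro mx i j
    simp only [eScan, List.foldl_map]
    rfl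
  have hmid : ∀ (mx i : Int),
      (PySem.List.pyRange (i + 1) ((li.length : Int) - 1) 1).foldl (fun st j =>
        match st with
        | .inl r => .inl r
        | .inr mx =>
          (PySem.List.pyRange (j + 1) (li.length : Int) 1).foldl (fun st k =>
            match st with
            | .inl r => .inl r
            | .inr mx =>
              let t := PySem.List.pyGetD li i 0 + PySem.List.pyGetD li j 0 + PySem.List.pyGetD li k 0
              if t = num then .inl num
              else if mx < t ∧ t < num then .inr t else .inr mx) (Sum.inr mx)) (Sum.inr mx)
      = eScan num (.inr mx) ((PySem.List.pyRange (i + 1) ((li.length : Int) - 1) 1).flatMap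
          (fun j => (PySem.List.pyRange (j + 1) (li.length : Int) 1).map
            (fun k => G li i + G li j + G li k))) := by
    intro mx i
    simp only [hinner]
    exact foldl_eScan_flatMap num _ _ _
  unfold check sumsA
  simp only [hmid]
  rw [foldl_eScan_flatMap num _ _ _]

lemma mem_sumsA (li : List Int) (t : Int) : t ∈ sumsA li ↔ TS li t := by
  unfold sumsA TS
  simp only [List.mem_flatMap, List.mem_map, PySem.List.mem_pyRange_one]
  constructor
  · rintro ⟨i, ⟨hi0, hi2⟩, j, ⟨hj1, hj2⟩, k, ⟨hk1, hk2⟩, rfl⟩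
    exact ⟨i, j, k, hi0, by omega, by omega, hk2, rfl⟩
  · rintro ⟨i, j, k, hi0, hij, hjk, hk, hsum⟩
    exact ⟨i, ⟨hi0, by omega⟩, j, ⟨by omega, by omega⟩, k, ⟨by omega, hk⟩, hsum⟩

lemma A_char (li : List Int) (num : Int) :
    (TS li num → check li num = num) ∧ (¬ TS li num → IsBest li num (check li num)) := by
  rw [check_eq_eScan, eScan_char]
  constructor
  · intro h
    rw [if_pos ((mem_sumsA li num).mpr h)]
  · intro h
    rw [if_neg (fun hc => h ((mem_sumsA li num).mp hc))]
    rcases maxf_props num 0 (sumsA li) with ⟨h1, h2, h3⟩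
    refine ⟨h1, fun t ht hlt => h2 t ((mem_sumsA li t).mpr ht) hlt, ?_⟩
    rcases h3 with h3 | ⟨h3a, h3b⟩
    · exact Or.inl h3
    · exact Or.inr ⟨h3a, (mem_sumsA li _).mp h3b⟩

-- ===== B-side characterisation =====

lemma G_mono (s : List Int) (hs : s.Pairwise (· ≤ ·)) (p q : Int)
    (h0 : 0 ≤ p) (hpq : p ≤ q) (hq : q < (s.length : Int)) : G s p ≤ G s q := by
  have hp : p < (s.length : Int) := by omega
  have hq0 : 0 ≤ q := by omega
  rw [G, G, PySem.List.pyGetD_eq_getElem s 0 h0 hp, PySem.List.pyGetD_eq_getElem s 0 hq0 hq]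
  rcases eq_or_lt_of_le hpq with rfl | hlt
  · exact le_refl _
  · exact (List.pairwise_iff_getElem.mp hs) p.toNat q.toNat (by omega) (by omega) (by omega)

lemma tp_char (s : List Int) (hs : s.Pairwise (· ≤ ·)) (num i : Int)
    (hi0 : 0 ≤ i) :
    ∀ fuel : Nat, ∀ lo hi best : Int, (hi - lo).toNat ≤ fuel → i < lo → hi < (s.length : Int) →
    ((∃ p q : Int, lo ≤ p ∧ p < q ∧ q ≤ hi ∧ G s i + G s p + G s q = num) →
        tpLoop s num i lo hi best = .inl num) ∧
    (¬ (∃ p q : Int, lo ≤ p ∧ p < q ∧ q ≤ hi ∧ G s i + G s p + G s q = num) →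
        ∃ b', tpLoop s num i lo hi best = .inr b' ∧ best ≤ b' ∧
          (∀ p q : Int, lo ≤ p → p < q → q ≤ hi → G s i + G s p + G s q < num →
            G s i + G s p + G s q ≤ b') ∧
          (b' = best ∨ (b' < num ∧ ∃ p q : Int, lo ≤ p ∧ p < q ∧ q ≤ hi ∧
            G s i + G s p + G s q = b'))) := by
  intro fuel
  induction fuel with
  | zero =>
    intro lo hi best hf hlo hhi
    have hlt : ¬ lo < hi := by omega
    rw [tpLoop]
    simp only [dif_neg hlt]
    constructor
    · rintro ⟨p, q, hp, hpq, hq, _⟩; omega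
    · intro _
      exact ⟨best, rfl, le_refl _, fun p q hp hpq hq _ => by omega, Or.inl rfl⟩
  | succ f ih =>
    intro lo hi best hf hlo hhi
    by_cases hlt : lo < hi
    · simp only [G]
      rw [tpLoop]
      simp only [dif_pos hlt]
      by_cases h1 : PySem.List.pyGetD s i 0 + PySem.List.pyGetD s lo 0 + PySem.List.pyGetD s hi 0 = num
      · -- exact hit at (lo, hi)
        rw [if_pos h1]
        constructor
        · intro _; rfl
        · intro hno
          exact absurd ⟨lo, hi, le_refl lo, hlt, le_refl hi, h1⟩ hno
      rw [if_neg h1]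
      by_cases h2 : PySem.List.pyGetD s i 0 + PySem.List.pyGetD s lo 0 + PySem.List.pyGetD s hi 0 < num
      · -- t < num : advance lo
        rw [if_pos h2]
        obtain ⟨IH1, IH2⟩ := ih (lo + 1) hi
          (if PySem.List.pyGetD s i 0 + PySem.List.pyGetD s lo 0 + PySem.List.pyGetD s hi 0 > best
            then PySem.List.pyGetD s i 0 + PySem.List.pyGetD s lo 0 + PySem.List.pyGetD s hi 0
            else best) (by omega) (by omega) hhi
        simp only [G] at IH1 IH2
        constructor
        · rintro ⟨p, q, hp, hpq, hq, hsum⟩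
          by_cases hplo : p = lo
          · subst hplo
            have hm : PySem.List.pyGetD s q 0 ≤ PySem.List.pyGetD s hi 0 := by
              have := G_mono s hs q hi (by omega) (by omega) hhi
              simpa [G] using this
            omega
          · exact IH1 ⟨p, q, by omega, hpq, hq, hsum⟩
        · intro hno
          have hno' : ¬ (∃ p q : Int, lo + 1 ≤ p ∧ p < q ∧ q ≤ hi ∧
              PySem.List.pyGetD s i 0 + PySem.List.pyGetD s p 0 + PySem.List.pyGetD s q 0 = num) := by
            rintro ⟨p, q, hp, hpq, hq, hsum⟩
            exact hno ⟨p, q, by omega, hpq, hq, hsum⟩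
          obtain ⟨b', heq, hb1, hb2, hb3⟩ := IH2 hno'
          refine ⟨b', heq, by split_ifs at hb1 <;> omega, ?_, ?_⟩
          · intro p q hp hpq hq hslt
            by_cases hplo : p = lo
            · subst hplo
              have hm : PySem.List.pyGetD s q 0 ≤ PySem.List.pyGetD s hi 0 := by
                have := G_mono s hs q hi (by omega) (by omega) hhi
                simpa [G] using this
              split_ifs at hb1 <;> omega
            · exact hb2 p q (by omega) hpq hq hslt
          · rcases hb3 with hb3 | ⟨hb3a, p, q, hp, hpq, hq, hsum⟩
            · rw [hb3]
              split_ifs with hgt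
              · right
                exact ⟨by omega, lo, hi, le_refl lo, hlt, le_refl hi, rfl⟩
              · left; rfl
            · right
              exact ⟨hb3a, p, q, by omega, hpq, hq, hsum⟩
      · -- t > num : retreat hi
        rw [if_neg h2]
        obtain ⟨IH1, IH2⟩ := ih lo (hi - 1) best (by omega) hlo (by omega)
        simp only [G] at IH1 IH2
        constructor
        · rintro ⟨p, q, hp, hpq, hq, hsum⟩
          by_cases hqhi : q = hi
          · subst hqhi
            have hm : PySem.List.pyGetD s lo 0 ≤ PySem.List.pyGetD s p 0 := by
              have := G_mono s hs lo p (by omega) (by omega) (by omega)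
              simpa [G] using this
            omega
          · exact IH1 ⟨p, q, hp, hpq, by omega, hsum⟩
        · intro hno
          have hno' : ¬ (∃ p q : Int, lo ≤ p ∧ p < q ∧ q ≤ hi - 1 ∧
              PySem.List.pyGetD s i 0 + PySem.List.pyGetD s p 0 + PySem.List.pyGetD s q 0 = num) := by
            rintro ⟨p, q, hp, hpq, hq, hsum⟩
            exact hno ⟨p, q, hp, hpq, by omega, hsum⟩
          obtain ⟨b', heq, hb1, hb2, hb3⟩ := IH2 hno'
          refine ⟨b', heq, hb1, ?_, ?_⟩
          · intro p q hp hpq hq hslt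
            by_cases hqhi : q = hi
            · subst hqhi
              have hm : PySem.List.pyGetD s lo 0 ≤ PySem.List.pyGetD s p 0 := by
                have := G_mono s hs lo p (by omega) (by omega) (by omega)
                simpa [G] using this
              omega
            · exact hb2 p q hp hpq (by omega) hslt
          · rcases hb3 with hb3 | ⟨hb3a, p, q, hp, hpq, hq, hsum⟩
            · exact Or.inl hb3
            · exact Or.inr ⟨hb3a, p, q, hp, hpq, by omega, hsum⟩
    · have h0 : ¬ lo < hi := hlt
      rw [tpLoop]
      simp only [dif_neg h0]
      constructor
      · rintro ⟨p, q, hp, hpq, hq, _⟩; omega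
      · intro _
        exact ⟨best, rfl, le_refl _, fun p q hp hpq hq _ => by omega, Or.inl rfl⟩

lemma outer_char (s : List Int) (hs : s.Pairwise (· ≤ ·)) (num : Int) :
    ∀ fuel : Nat, ∀ m best : Int, 0 ≤ m → (((s.length : Int) - 2) - m).toNat ≤ fuel →
    ((∃ i p q : Int, m ≤ i ∧ i < p ∧ p < q ∧ q < (s.length : Int) ∧
        G s i + G s p + G s q = num) →
      (PySem.List.pyRange m ((s.length : Int) - 2) 1).foldl
        (fun st i => match st with
          | .inl r => (Sum.inl r : Sum Int Int)
          | .inr best => tpLoop s num i (i + 1) ((s.length : Int) - 1) best) (Sum.inr best)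
        = .inl num) ∧
    (¬ (∃ i p q : Int, m ≤ i ∧ i < p ∧ p < q ∧ q < (s.length : Int) ∧
        G s i + G s p + G s q = num) →
      ∃ b', (PySem.List.pyRange m ((s.length : Int) - 2) 1).foldl
        (fun st i => match st with
          | .inl r => (Sum.inl r : Sum Int Int)
          | .inr best => tpLoop s num i (i + 1) ((s.length : Int) - 1) best) (Sum.inr best)
        = .inr b' ∧ best ≤ b' ∧
        (∀ i p q : Int, m ≤ i → i < p → p < q → q < (s.length : Int) →
          G s i + G s p + G s q < num → G s i + G s p + G s q ≤ b') ∧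
        (b' = best ∨ (b' < num ∧ ∃ i p q : Int, m ≤ i ∧ i < p ∧ p < q ∧
          q < (s.length : Int) ∧ G s i + G s p + G s q = b'))) := by
  intro fuel
  induction fuel with
  | zero =>
    intro m best hm0 hf
    rw [PySem.List.pyRange_one_eq_nil (by omega)]
    constructor
    · rintro ⟨i, p, q, hmi, hip, hpq, hq, _⟩; omega
    · intro _
      exact ⟨best, rfl, le_refl _, fun i p q hmi hip hpq hq _ => by omega, Or.inl rfl⟩
  | succ f ih =>
    intro m best hm0 hf
    by_cases hm : (s.length : Int) - 2 ≤ m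
    · rw [PySem.List.pyRange_one_eq_nil (by omega)]
      constructor
      · rintro ⟨i, p, q, hmi, hip, hpq, hq, _⟩; omega
      · intro _
        exact ⟨best, rfl, le_refl _, fun i p q hmi hip hpq hq _ => by omega, Or.inl rfl⟩
    · rw [PySem.List.pyRange_one_cons (by omega)]
      dsimp only [List.foldl_cons]
      obtain ⟨T1, T2⟩ := tp_char s hs num m hm0 ((((s.length : Int) - 1) - (m + 1)).toNat)
        (m + 1) ((s.length : Int) - 1) best (le_refl _) (by omega) (by omega)
      by_cases hp : ∃ p q : Int, m + 1 ≤ p ∧ p < q ∧ q ≤ (s.length : Int) - 1 ∧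
          G s m + G s p + G s q = num
      · rw [T1 hp, foldl_step_inl (fun best i => tpLoop s num i (i + 1) ((s.length : Int) - 1) best)]
        constructor
        · intro _; rfl
        · intro hno
          obtain ⟨p, q, hp1, hp2, hp3, hp4⟩ := hp
          exact absurd ⟨m, p, q, le_refl m, by omega, hp2, by omega, hp4⟩ hno
      · have hf2 : (((s.length : Int) - 2) - (m + 1)).toNat ≤ f := by omega
        obtain ⟨b₀, heq, h01, h02, h03⟩ := T2 hp
        rw [heq]
        obtain ⟨IH1, IH2⟩ := ih (m + 1) b₀ (by omega) hf2
        constructor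
        · rintro ⟨i, p, q, hmi, hip, hpq, hq, hsum⟩
          by_cases him : i = m
          · subst him
            exact absurd ⟨p, q, by omega, hpq, by omega, hsum⟩ hp
          · exact IH1 ⟨i, p, q, by omega, hip, hpq, hq, hsum⟩
        · intro hno
          have hno' : ¬ (∃ i p q : Int, m + 1 ≤ i ∧ i < p ∧ p < q ∧ q < (s.length : Int) ∧
              G s i + G s p + G s q = num) := by
            rintro ⟨i, p, q, hmi, hip, hpq, hq, hsum⟩
            exact hno ⟨i, p, q, by omega, hip, hpq, hq, hsum⟩
          obtain ⟨b', heq', hb1, hb2, hb3⟩ := IH2 hno'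
          refine ⟨b', heq', by omega, ?_, ?_⟩
          · intro i p q hmi hip hpq hq hslt
            by_cases him : i = m
            · subst him
              have := h02 p q (by omega) hpq (by omega) hslt
              omega
            · exact hb2 i p q (by omega) hip hpq hq hslt
          · rcases hb3 with hb3 | ⟨hb3a, i, p, q, hmi, hip, hpq, hq, hsum⟩
            · rcases h03 with h03 | ⟨h03a, p, q, hp1, hp2, hp3, hp4⟩
              · left; rw [hb3, h03]
              · right
                refine ⟨by omega, m, p, q, le_refl m, by omega, hp2, by omega, ?_⟩
                omega
            · right
              exact ⟨hb3a, i, p, q, by omega, hip, hpq, hq, hsum⟩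

lemma B_char (li : List Int) (num : Int) :
    (TS (PySem.List.sorted li (fun x => x) false) num → check_alt li num = num) ∧
    (¬ TS (PySem.List.sorted li (fun x => x) false) num →
      IsBest (PySem.List.sorted li (fun x => x) false) num (check_alt li num)) := by
  set s := PySem.List.sorted li (fun x => x) false with hsdef
  have hs : s.Pairwise (· ≤ ·) := by
    simpa using PySem.List.sorted_pairwise li (fun x => x)
  obtain ⟨O1, O2⟩ := outer_char s hs num (((s.length : Int) - 2) - 0).toNat 0 0
    (le_refl 0) (le_refl _)
  have hrw : check_alt li num = (match (PySem.List.pyRange 0 ((s.length : Int) - 2) 1).foldl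
      (fun st i => match st with
        | .inl r => (Sum.inl r : Sum Int Int)
        | .inr best => tpLoop s num i (i + 1) ((s.length : Int) - 1) best) (Sum.inr 0) with
      | .inl r => r | .inr best => best) := rfl
  rw [hrw]
  constructor
  · rintro ⟨i, j, k, hi0, hij, hjk, hk, hsum⟩
    rw [O1 ⟨i, j, k, hi0, hij, hjk, hk, hsum⟩]
  · intro hno
    have hno' : ¬ (∃ i p q : Int, 0 ≤ i ∧ i < p ∧ p < q ∧ q < (s.length : Int) ∧
        G s i + G s p + G s q = num) := fun ⟨i, p, q, h1, h2, h3, h4, h5⟩ =>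
      hno ⟨i, p, q, h1, h2, h3, h4, h5⟩
    obtain ⟨b', heq, hb1, hb2, hb3⟩ := O2 hno'
    rw [heq]
    show IsBest s num b'
    refine ⟨hb1, ?_, ?_⟩
    · rintro t ⟨i, j, k, h1, h2, h3, h4, rfl⟩ hlt
      exact hb2 i j k h1 h2 h3 h4 hlt
    · rcases hb3 with hb3 | ⟨hb3a, i, p, q, h1, h2, h3, h4, h5⟩
      · exact Or.inl hb3
      · exact Or.inr ⟨hb3a, i, p, q, h1, h2, h3, h4, h5⟩

-- ===== transfer and uniqueness =====

lemma TS_iff_sublist (l : List Int) (t : Int) :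
    TS l t ↔ ∃ c : List Int, c.Sublist l ∧ c.length = 3 ∧ c.sum = t := by
  constructor
  · rintro ⟨i, j, k, hi0, hij, hjk, hk, hsum⟩
    have hin : i.toNat < l.length := by omega
    have hjn : j.toNat < l.length := by omega
    have hkn : k.toNat < l.length := by omega
    have e1 : G l i = l[i.toNat] := PySem.List.pyGetD_eq_getElem l 0 hi0 (by omega)
    have e2 : G l j = l[j.toNat] := PySem.List.pyGetD_eq_getElem l 0 (by omega) (by omega)
    have e3 : G l k = l[k.toNat] := PySem.List.pyGetD_eq_getElem l 0 (by omega) (by omega)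
    refine ⟨[l[i.toNat], l[j.toNat], l[k.toNat]], ?_, rfl, ?_⟩
    · have hsl := List.map_getElem_sublist (l := l)
        (is := [⟨i.toNat, hin⟩, ⟨j.toNat, hjn⟩, ⟨k.toNat, hkn⟩])
        (by
          refine List.Pairwise.cons (fun x hx => ?_)
            (List.Pairwise.cons (fun x hx => ?_) (List.pairwise_singleton _ _))
          · rcases List.mem_cons.mp hx with rfl | hx
            · exact Fin.mk_lt_mk.mpr (by omega)
            · rcases List.mem_singleton.mp hx with rfl
              exact Fin.mk_lt_mk.mpr (by omega)
          · rcases List.mem_singleton.mp hx with rfl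
            exact Fin.mk_lt_mk.mpr (by omega))
      exact hsl
    · simp only [List.sum_cons, List.sum_nil]
      rw [← e1, ← e2, ← e3]
      omega
  · rintro ⟨c, hsub, hlen, hsum⟩
    obtain ⟨is, rfl, hpw⟩ := List.sublist_eq_map_getElem hsub
    have hlen' : is.length = 3 := by simpa using hlen
    obtain ⟨a, b, c', rfl⟩ := List.length_eq_three.mp hlen'
    simp only [List.pairwise_cons, List.mem_cons, Fin.lt_def] at hpw
    simp only [List.map_cons, List.map_nil, List.sum_cons, List.sum_nil, Fin.getElem_fin] at hsum
    refine ⟨(a : Nat), (b : Nat), (c' : Nat), Int.natCast_nonneg _, ?_, ?_, ?_, ?_⟩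
    · exact_mod_cast hpw.1 b (Or.inl rfl)
    · exact_mod_cast hpw.2.1 c' (Or.inl rfl)
    · exact_mod_cast c'.isLt
    · have e1 : G l ((a : Nat) : Int) = l[(a : Nat)] := by
        rw [G, PySem.List.pyGetD_natCast, List.getD_eq_getElem l 0 a.isLt]
      have e2 : G l ((b : Nat) : Int) = l[(b : Nat)] := by
        rw [G, PySem.List.pyGetD_natCast, List.getD_eq_getElem l 0 b.isLt]
      have e3 : G l ((c' : Nat) : Int) = l[(c' : Nat)] := by
        rw [G, PySem.List.pyGetD_natCast, List.getD_eq_getElem l 0 c'.isLt]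
      rw [e1, e2, e3]
      omega

lemma TS_perm (l l' : List Int) (h : l.Perm l') (t : Int) : TS l t ↔ TS l' t := by
  have key : ∀ (l1 l2 : List Int), l1.Perm l2 → TS l1 t → TS l2 t := by
    intro l1 l2 hp hts
    obtain ⟨c, hsub, hlen, hsum⟩ := (TS_iff_sublist l1 t).mp hts
    obtain ⟨c₂, hcp, hsub₂⟩ := hsub.subperm.trans hp.subperm
    exact (TS_iff_sublist l2 t).mpr ⟨c₂, hsub₂, by rw [hcp.length_eq, hlen],
      by rw [hcp.sum_eq, hsum]⟩
  exact ⟨key l l' h, key l' l h.symm⟩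

lemma IsBest_unique (l : List Int) (num v w : Int)
    (hv : IsBest l num v) (hw : IsBest l num w) : v = w := by
  rcases hv with ⟨hv0, hvU, hvW⟩
  rcases hw with ⟨hw0, hwU, hwW⟩
  rcases hvW with rfl | ⟨hvlt, hvTS⟩
  · rcases hwW with rfl | ⟨hwlt, hwTS⟩
    · rfl
    · have := hvU w hwTS hwlt; omega
  · rcases hwW with rfl | ⟨hwlt, hwTS⟩
    · have := hwU v hvTS hvlt; omega
    · have h1 := hvU w hwTS hwlt
      have h2 := hwU v hvTS hvlt
      omega

-- ===== VERDICT (by name: the statement is the Claim_ definition above) =====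
theorem check_spec : Claim_equal_check := by
  intro li num _
  unfold Spec_check
  have hperm : (PySem.List.sorted li (fun x => x) false).Perm li := PySem.List.sorted_perm ..
  have hTS : ∀ t, TS li t ↔ TS (PySem.List.sorted li (fun x => x) false) t :=
    fun t => TS_perm _ _ hperm.symm t
  rcases A_char li num with ⟨hA1, hA2⟩
  rcases B_char li num with ⟨hB1, hB2⟩
  by_cases h : TS li num
  · rw [hA1 h, hB1 ((hTS num).mp h)]
  · have hbA := hA2 h
    have hbB := hB2 (fun hc => h ((hTS num).mpr hc))
    have hbB' : IsBest li num (check_alt li num) := by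
      rcases hbB with ⟨h0, hU, hW⟩
      refine ⟨h0, fun t ht hlt => hU t ((hTS t).mp ht) hlt, ?_⟩
      rcases hW with h' | ⟨h1, h2⟩
      · exact Or.inl h'
      · exact Or.inr ⟨h1, (hTS _).mpr h2⟩
    exact IsBest_unique li num _ _ hbA hbB'
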